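-- pv_equiv track=rewrite | github.com/RanjanBa/MNIT-2023-24 | ADB Lab/Project/utility.py | isQueryKeywordPresent
-- ===== SOURCE A (Python) =====
-- from enum import Enum
--
-- class QueryKeywords(Enum):
--     CREATE = "create"
--     DATABASE = "database"
--     TABLE = "table"
--     SELECT = "select"
--     FROM = "from"
--     WHERE = "where"
--     INNER_JOIN = "inner join"
--     LEFT_JOIN = "left join"
--     RIGHT_JOIN = "right join"
--     NATURAL_JOIN = "natural join"
--     ON = "on"
--     UNION = "union"
--     INTERSECTION = "intersection"
--     EXCEPT = "except"
--
-- def isQueryKeywordPresent(query : str):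
--     for idx in range(len(query)):
--         for keyword in QueryKeywords:
--             if idx > 0 and query[idx-1] != " ":
--                 continue
--
--             last = idx + len(keyword.value)
--
--             if last < len(query) and query[last] != " ":
--                 continue
--
--             new_word = query[idx:last]
--
--             if new_word.lower() == keyword.value.lower():
--                 return True
--
--     return False
-- ===== SOURCE B (Python) =====
-- KEYWORDS = ["create", "database", "table", "select", "from", "where",
--             "inner join", "left join", "right join", "natural join",
--             "on", "union", "intersection", "except"]
--
-- def isQueryKeywordPresent(query: str):
--     padded = " " + query.lower() + " "
--     return any(" " + kw + " " in padded for kw in KEYWORDS)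
-- ===== Notes on version B (the rewrite author's own statement) =====
-- stated objective: faster
-- what changed: A's hand-written scan over every character position with per-keyword boundary checks and repeated substring lowering is replaced by the space-padding idiom: lowercase the query once, pad it with a single space on each side, and test each space-padded keyword for plain substring containment.
import Mathlib
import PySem

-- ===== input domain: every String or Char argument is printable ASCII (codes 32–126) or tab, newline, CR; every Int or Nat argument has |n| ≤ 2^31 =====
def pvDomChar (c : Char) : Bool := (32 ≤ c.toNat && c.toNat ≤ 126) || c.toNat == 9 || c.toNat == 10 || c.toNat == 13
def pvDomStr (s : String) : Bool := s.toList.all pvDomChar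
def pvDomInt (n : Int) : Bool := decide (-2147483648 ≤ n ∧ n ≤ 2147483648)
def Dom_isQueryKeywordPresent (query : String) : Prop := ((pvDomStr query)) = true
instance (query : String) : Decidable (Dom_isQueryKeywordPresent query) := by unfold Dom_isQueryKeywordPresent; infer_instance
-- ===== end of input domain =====

-- B replaces A's per-index nested boundary scan with the idiomatic space-padding
-- substring containment test on the once-lowered query; same result, measured faster
-- (constant factor: one containment test per keyword instead of per-position checks).

-- the QueryKeywords enum values, in iteration order
def pvKeywords : List String :=
  ["create", "database", "table", "select", "from", "where",
   "inner join", "left join", "right join", "natural join",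
   "on", "union", "intersection", "except"]

-- ===== PORT A =====
-- body of A's inner loop for one idx and one keyword: the two 'continue' guards,
-- then the 'new_word.lower() == keyword.value.lower()' test
-- ('last = idx + len(keyword.value)' is written inline at its two use sites)
def pvCheckAt (cs : List Char) (idx : Int) (kw : List Char) : Bool :=
  if idx > 0 && !(PySem.List.pyGet? cs (idx - 1) == some ' ') then false
  else
    if idx + (kw.length : Int) < (cs.length : Int) && !(PySem.List.pyGet? cs (idx + (kw.length : Int)) == some ' ') then false
    else PySem.Chars.lower (PySem.List.slice cs (some idx) (some (idx + (kw.length : Int)))) == PySem.Chars.lower kw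

def isQueryKeywordPresent (query : String) : Bool :=
  (PySem.List.pyRange 0 (PySem.Str.len query) 1).any fun idx =>
    pvKeywords.any fun kw => pvCheckAt query.toList idx kw.toList

-- ===== PORT B =====
def isQueryKeywordPresent_alt (query : String) : Bool :=
  let padded := ' ' :: PySem.Chars.lower query.toList ++ [' ']
  pvKeywords.any fun kw => PySem.Chars.isIn (' ' :: kw.toList ++ [' ']) padded

-- ===== PRECONDITION & SPEC =====
def Spec_isQueryKeywordPresent (query : String) (out : Bool) : Prop := out = isQueryKeywordPresent_alt query
instance (query : String) (out : Bool) : Decidable (Spec_isQueryKeywordPresent query out) := by unfold Spec_isQueryKeywordPresent; infer_instance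

-- ===== CLAIM (what is proved, stated in full; the proofs are below) =====
def Claim_equal_isQueryKeywordPresent : Prop := ∀ (query : String), Dom_isQueryKeywordPresent query → Spec_isQueryKeywordPresent query (isQueryKeywordPresent query)

-- ===== LEMMAS AND PROOFS =====

-- str.lower maps no character to a space except the space itself
lemma pvLowerChar_space (c : Char) : PySem.Chars.lowerChar c = ' ' ↔ c = ' ' := by
  unfold PySem.Chars.lowerChar PySem.Chars.isupper
  split_ifs with h
  · simp only [Bool.and_eq_true, decide_eq_true_eq] at h
    have hub : c.toNat ≤ 90 := Fin.mk_le_mk.mp h.2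
    have hlb : 65 ≤ c.toNat := Fin.mk_le_mk.mp h.1
    constructor
    · intro he
      exfalso
      have hv : (c.toNat + 32).isValidChar := by left; omega
      have h2 : (Char.ofNat (c.toNat + 32)).toNat = c.toNat + 32 := by
        unfold Char.ofNat; rw [dif_pos hv]; exact Char.toNat_ofNatAux hv
      have h3 := congrArg Char.toNat he
      rw [h2] at h3
      have h4 : (' ' : Char).toNat = 32 := rfl
      omega
    · intro he; subst he; exact absurd hlb (by decide)
  · rfl

lemma pvLower_getElem_space (cs : List Char) (j : Nat) :
    (PySem.Chars.lower cs)[j]? = some ' ' ↔ cs[j]? = some ' ' := by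
  unfold PySem.Chars.lower
  rw [List.getElem?_map]
  rcases hc : cs[j]? with _ | c
  · simp
  · simp [pvLowerChar_space]

-- "kw at the start of d, followed by a space or the end of d", as one append equation
lemma pvQ_iff (d kw : List Char) :
    (∃ t, d ++ [' '] = kw ++ ' ' :: t) ↔
      (kw.length ≤ d.length ∧ d.take kw.length = kw ∧
        (kw.length = d.length ∨ d[kw.length]? = some ' ')) := by
  constructor
  · rintro ⟨t, e⟩
    have hlen : d.length + 1 = kw.length + (t.length + 1) := by
      have := congrArg List.length e; simpa using this
    have hle : kw.length ≤ d.length := by omega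
    refine ⟨hle, ?_, ?_⟩
    · have := congrArg (List.take kw.length) e
      rwa [List.take_append_of_le_length hle, List.take_append_of_le_length (le_refl _),
        List.take_length] at this
    · by_cases hm : kw.length = d.length
      · exact Or.inl hm
      · right
        have hlt : kw.length < d.length := lt_of_le_of_ne hle hm
        have := congrArg (fun l => l[kw.length]?) e
        simp only at this
        rw [List.getElem?_append_left hlt, List.getElem?_append_right (le_refl _)] at this
        simpa using this
  · rintro ⟨hle, htake, hb⟩
    rcases hb with hm | hsp
    · refine ⟨[], ?_⟩
      have hd : d = kw := by rw [← htake, hm, List.take_length]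
      rw [hd]
    · have hlt : kw.length < d.length := (List.getElem?_eq_some_iff.mp hsp).1
      refine ⟨d.drop (kw.length + 1) ++ [' '], ?_⟩
      have hd : d = kw ++ ' ' :: d.drop (kw.length + 1) := by
        conv_lhs => rw [← List.take_append_drop kw.length d]
        rw [htake, List.drop_eq_getElem_cons hlt]
        have : d[kw.length] = ' ' := by
          have := hsp; rw [List.getElem?_eq_getElem hlt] at this; simpa using this
        rw [this]
      conv_lhs => rw [hd]
      simp

-- the padding trick: " kw " inside " lc " ↔ kw at a space-bounded position of lc
lemma pvCentral (lc kw : List Char) (hkw : kw ≠ []) :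
    PySem.Chars.isIn (' ' :: kw ++ [' ']) (' ' :: lc ++ [' ']) = true ↔
      ∃ i : Nat, (i = 0 ∨ lc[i - 1]? = some ' ') ∧
        ∃ t, lc.drop i ++ [' '] = kw ++ ' ' :: t := by
  rw [← PySem.Chars.exists_prefix_drop_iff_isIn]
  constructor
  · rintro ⟨j, t, ht⟩
    match j with
    | 0 =>
      refine ⟨0, Or.inl rfl, t, ?_⟩
      simp only [List.drop_zero] at ht ⊢
      simp only [List.cons_append, List.append_assoc, List.singleton_append,
        List.cons.injEq] at ht
      exact ht.2.symm
    | j' + 1 =>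
      have hdrop : (' ' :: lc ++ [' ']).drop (j' + 1) = (lc ++ [' ']).drop j' := by
        simp [List.drop_succ_cons]
      rw [hdrop] at ht
      have hj' : j' ≤ lc.length := by
        by_contra hgt
        push Not at hgt
        rw [List.drop_eq_nil_of_le (by simp; omega)] at ht
        exact absurd ht (by simp)
      rw [List.drop_append_of_le_length hj'] at ht
      have hjlt : j' < lc.length := by
        rcases Nat.lt_or_ge j' lc.length with h | h
        · exact h
        · exfalso
          rw [List.drop_eq_nil_of_le h] at ht
          have hlen := congrArg List.length ht
          simp at hlen
      rw [List.drop_eq_getElem_cons hjlt] at ht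
      simp only [List.cons_append, List.append_assoc, List.singleton_append,
        List.cons.injEq] at ht
      refine ⟨j' + 1, Or.inr ?_, t, ht.2.symm⟩
      simp only [Nat.add_sub_cancel]
      rw [List.getElem?_eq_getElem hjlt, ← ht.1]
  · rintro ⟨i, hb, t, e⟩
    match i with
    | 0 =>
      refine ⟨0, t, ?_⟩
      simp only [List.drop_zero] at e ⊢
      simp only [List.cons_append, List.append_assoc, List.singleton_append, List.nil_append]
      rw [← e]
    | i' + 1 =>
      have hsp : lc[i']? = some ' ' := by
        rcases hb with h0 | h
        · omega
        · simpa using h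
      have hilt : i' < lc.length := (List.getElem?_eq_some_iff.mp hsp).1
      refine ⟨i' + 1, t, ?_⟩
      have hdrop : (' ' :: lc ++ [' ']).drop (i' + 1) = (lc ++ [' ']).drop i' := by
        simp [List.drop_succ_cons]
      rw [hdrop, List.drop_append_of_le_length (le_of_lt hilt),
        List.drop_eq_getElem_cons hilt]
      have hsp' : lc[i'] = ' ' := by
        have := hsp; rw [List.getElem?_eq_getElem hilt] at this; simpa using this
      rw [hsp']
      simp only [List.cons_append, List.append_assoc, List.singleton_append, List.nil_append]
      rw [← e]

-- A's per-index check, characterised in the terms of pvCentral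
lemma pvCheckAt_iff (cs kw : List Char) (i : Nat) (hkw : PySem.Chars.lower kw = kw)
    (hi : i < cs.length) :
    pvCheckAt cs (i : Int) kw = true ↔
      ((i = 0 ∨ (PySem.Chars.lower cs)[i - 1]? = some ' ') ∧
        ∃ t, (PySem.Chars.lower cs).drop i ++ [' '] = kw ++ ' ' :: t) := by
  have hlc : (PySem.Chars.lower cs).length = cs.length := by
    unfold PySem.Chars.lower; simp
  have hslice : PySem.List.slice cs (some (i : Int)) (some ((i : Int) + kw.length)) =
      (cs.drop i).take kw.length := by
    rw [PySem.List.slice_toNat cs (by positivity) (by positivity)]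
    congr 1
    omega
  have hlow : PySem.Chars.lower ((cs.drop i).take kw.length) =
      ((PySem.Chars.lower cs).drop i).take kw.length := by
    unfold PySem.Chars.lower; rw [List.map_take, List.map_drop]
  rw [pvQ_iff]
  unfold pvCheckAt
  rw [hkw, hslice, hlow]
  have hd : ((PySem.Chars.lower cs).drop i).length = cs.length - i := by
    rw [List.length_drop, hlc]
  constructor
  · intro h
    split_ifs at h with h1 h2
    -- (the two guard branches leave h : false = true and are closed by split_ifs)
    have hmatch : ((PySem.Chars.lower cs).drop i).take kw.length = kw := by
      simpa using h
    have hmle : kw.length ≤ cs.length - i := by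
      have := congrArg List.length hmatch
      simp only [List.length_take, hd] at this
      omega
    refine ⟨?_, hmle.trans_eq hd.symm, hmatch, ?_⟩
    · simp only [Bool.and_eq_true, Bool.not_eq_true', not_and, decide_eq_true_eq] at h1
      by_cases hiz : i = 0
      · exact Or.inl hiz
      · right
        have hpos : (0 : Int) < i := by exact_mod_cast Nat.pos_of_ne_zero hiz
        have := h1 hpos
        rw [show (i : Int) - 1 = ((i - 1 : Nat) : Int) by omega,
          PySem.List.pyGet?_natCast] at this
        rw [pvLower_getElem_space]
        simpa using this
    · simp only [Bool.and_eq_true, Bool.not_eq_true', not_and, decide_eq_true_eq] at h2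
      by_cases hendc : kw.length = cs.length - i
      · left; rw [hd]; exact hendc
      · right
        have hlt : ((i : Int) + kw.length) < (cs.length : Int) := by
          omega
        have := h2 hlt
        rw [show (i : Int) + kw.length = ((i + kw.length : Nat) : Int) by push_cast; ring,
          PySem.List.pyGet?_natCast] at this
        rw [List.getElem?_drop, pvLower_getElem_space]
        simpa using this
  · rintro ⟨hb, hle, htake, hend⟩
    have hmle : kw.length ≤ cs.length - i := hle.trans_eq hd
    have hg1 : ¬(decide ((i : Int) > 0) && !(PySem.List.pyGet? cs ((i : Int) - 1) == some ' ')) = true := by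
      rcases hb with hiz | hsp
      · subst hiz; simp
      · simp only [Bool.and_eq_true, Bool.not_eq_true', beq_iff_eq, not_and,
          decide_eq_true_eq]
        intro hpos
        have hiz : i ≠ 0 := by
          intro h0; subst h0; simp at hpos
        rw [show (i : Int) - 1 = ((i - 1 : Nat) : Int) by omega,
          PySem.List.pyGet?_natCast]
        rw [pvLower_getElem_space] at hsp
        simpa using hsp
    have hg2 : ¬(decide ((i : Int) + kw.length < (cs.length : Int)) && !(PySem.List.pyGet? cs ((i : Int) + kw.length) == some ' ')) = true := by
      simp only [Bool.and_eq_true, Bool.not_eq_true', not_and,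
        decide_eq_true_eq]
      intro hlt
      rcases hend with heq | hsp
      · exfalso; rw [hd] at heq; omega
      · rw [show (i : Int) + kw.length = ((i + kw.length : Nat) : Int) by push_cast; ring,
          PySem.List.pyGet?_natCast]
        rw [List.getElem?_drop, pvLower_getElem_space] at hsp
        simpa using hsp
    rw [if_neg hg1, if_neg hg2]
    simpa using htake

-- per keyword: A's scan over all positions ↔ B's padded substring test
lemma pvPerKw (cs kw : List Char) (hl : PySem.Chars.lower kw = kw) (hne : kw ≠ []) :
    (∃ idx ∈ PySem.List.pyRange 0 (cs.length : Int) 1, pvCheckAt cs idx kw = true) ↔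
      PySem.Chars.isIn (' ' :: kw ++ [' ']) (' ' :: PySem.Chars.lower cs ++ [' ']) = true := by
  rw [pvCentral _ _ hne]
  constructor
  · rintro ⟨idx, hmem, hc⟩
    rw [PySem.List.mem_pyRange_one] at hmem
    obtain ⟨h0, hlt⟩ := hmem
    have hidx : idx = ((idx.toNat : Nat) : Int) := (Int.toNat_of_nonneg h0).symm
    have hilt : idx.toNat < cs.length := by omega
    rw [hidx] at hc
    exact ⟨idx.toNat, (pvCheckAt_iff cs kw idx.toNat hl hilt).mp hc⟩
  · rintro ⟨i, hb, t, e⟩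
    have hlcl : (PySem.Chars.lower cs).length = cs.length := by
      unfold PySem.Chars.lower; simp
    have hlen : ((PySem.Chars.lower cs).drop i).length + 1 = kw.length + (t.length + 1) := by
      have := congrArg List.length e; simpa using this
    rw [List.length_drop, hlcl] at hlen
    have hkpos : 0 < kw.length := List.length_pos_of_ne_nil hne
    have hilt : i < cs.length := by omega
    refine ⟨(i : Int), ?_, (pvCheckAt_iff cs kw i hl hilt).mpr ⟨hb, t, e⟩⟩
    rw [PySem.List.mem_pyRange_one]
    omega

lemma pvKeywords_facts : ∀ kw ∈ pvKeywords,
    PySem.Chars.lower kw.toList = kw.toList ∧ kw.toList ≠ [] := by decide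

-- ===== VERDICT (by name: the statement is the Claim_ definition above) =====
theorem isQueryKeywordPresent_spec : Claim_equal_isQueryKeywordPresent := by
  intro query _
  unfold Spec_isQueryKeywordPresent
  rw [Bool.eq_iff_iff]
  simp only [isQueryKeywordPresent, isQueryKeywordPresent_alt, PySem.Str.len,
    List.any_eq_true]
  constructor
  · rintro ⟨idx, hidx, kw, hkw, hc⟩
    obtain ⟨hl, hne⟩ := pvKeywords_facts kw hkw
    exact ⟨kw, hkw, (pvPerKw query.toList kw.toList hl hne).mp ⟨idx, hidx, hc⟩⟩
  · rintro ⟨kw, hkw, hin⟩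
    obtain ⟨hl, hne⟩ := pvKeywords_facts kw hkw
    obtain ⟨idx, hidx, hc⟩ := (pvPerKw query.toList kw.toList hl hne).mpr hin
    exact ⟨idx, hidx, kw, hkw, hc⟩
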